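-- pv_equiv track=rewrite | github.com/seosoe/2024ClassWork | Ex08/Sample02.py | str2num
-- ===== SOURCE A (Python) =====
-- vowels = {'a': 66, 'e': 72, 'i': 89, 'o': 73, 'u': 19}
--
-- def str2num(word:str) -> int:
--     '''
--     return the sum of the values for the vowels corresponding to the data set.
--     For instance, 'daeju' has three vowels and its sum is 157.
--     '''
--     result = 0
--     for ele in word:
--         if ele in vowels:
--             result = result + vowels[ele]
--         elif chr(ord(ele) + 32) in vowels:
--             result = result + vowels[chr(ord(ele) + 32)]
--
--     return result
-- ===== SOURCE B (Python) =====
-- vowels = {'a': 66, 'e': 72, 'i': 89, 'o': 73, 'u': 19}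
--
-- def str2num(word: str) -> int:
--     # Build a frequency table of the word in one pass, then combine it
--     # in a fixed-size pass over the five vowel keys (lower + upper case).
--     counts = {}
--     for ch in word:
--         counts[ch] = counts.get(ch, 0) + 1
--     return sum(val * (counts.get(v, 0) + counts.get(v.upper(), 0))
--                for v, val in vowels.items())
-- ===== Notes on version B (the rewrite author's own statement) =====
-- stated objective: alternative
-- what changed: B replaces A's per-character branch-and-add loop over the vowel dict by building a frequency table of the word in one pass and then summing value*(counts[v]+counts[v.upper()]) in a fixed-size pass over the five vowel keys.
import Mathlib
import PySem

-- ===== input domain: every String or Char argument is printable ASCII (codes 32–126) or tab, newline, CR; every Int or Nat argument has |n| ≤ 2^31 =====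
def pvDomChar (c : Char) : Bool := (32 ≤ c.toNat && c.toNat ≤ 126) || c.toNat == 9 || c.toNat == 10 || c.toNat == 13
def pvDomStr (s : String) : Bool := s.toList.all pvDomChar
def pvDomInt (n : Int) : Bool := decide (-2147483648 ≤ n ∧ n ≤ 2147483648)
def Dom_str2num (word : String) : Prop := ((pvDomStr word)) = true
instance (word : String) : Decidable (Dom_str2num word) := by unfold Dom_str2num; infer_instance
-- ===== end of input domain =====

-- B replaces A's per-character branch-and-add loop by a frequency table built in
-- one pass, combined in a fixed-size pass over the five vowel keys (objective: alternative).

-- ===== PORT A =====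
-- module-level constant: vowels = {'a': 66, 'e': 72, 'i': 89, 'o': 73, 'u': 19}
-- (single-character Python string keys are ported as Char keys)
def pvVowels : PySem.Dict Char Int :=
  PySem.Dict.ofList [('a', 66), ('e', 72), ('i', 89), ('o', 73), ('u', 19)]

def str2num (word : String) : Int :=
  -- chr(ord(ele) + 32) is ported by hand as Char.ofNat (ele.toNat + 32);
  -- exact on the ASCII domain (code + 32 is always a valid code point there)
  word.toList.foldl
    (fun result ele =>
      if pvVowels.contains ele then result + pvVowels.getD ele 0
      else if pvVowels.contains (Char.ofNat (ele.toNat + 32)) then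
        result + pvVowels.getD (Char.ofNat (ele.toNat + 32)) 0
      else result)
    0

-- ===== PORT B =====
-- B shares the module-level constant 'vowels' with A (same module in Python)
-- v.upper() applied to a one-character key string (exact for single characters)
def pvUpChar (c : Char) : Char := (PySem.Chars.upper [c]).headD c

def str2num_alt (word : String) : Int :=
  let counts := word.toList.foldl (fun d ch => d.insert ch (d.getD ch 0 + 1)) PySem.Dict.empty
  (pvVowels.items.map
    (fun p => p.2 * (counts.getD p.1 0 + counts.getD (pvUpChar p.1) 0))).sum

-- ===== PRECONDITION & SPEC =====
def Spec_str2num (word : String) (out : Int) : Prop := out = str2num_alt word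
instance (word : String) (out : Int) : Decidable (Spec_str2num word out) := by unfold Spec_str2num; infer_instance

-- ===== CLAIM (what is proved, stated in full; the proofs are below) =====
def Claim_equal_str2num : Prop := ∀ (word : String), Dom_str2num word → Spec_str2num word (str2num word)

-- ===== LEMMAS AND PROOFS =====

-- the body of A's loop, named for the proofs
def pvStepA (result : Int) (ele : Char) : Int :=
  if pvVowels.contains ele then result + pvVowels.getD ele 0
  else if pvVowels.contains (Char.ofNat (ele.toNat + 32)) then
    result + pvVowels.getD (Char.ofNat (ele.toNat + 32)) 0
  else result

theorem pvStepA_acc (cs : List Char) (acc : Int) :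
    cs.foldl pvStepA acc = acc + cs.foldl pvStepA 0 := by
  induction cs generalizing acc with
  | nil => simp
  | cons c cs ih =>
    simp only [List.foldl_cons]
    rw [ih (pvStepA acc c), ih (pvStepA 0 c)]
    unfold pvStepA
    split_ifs <;> ring

theorem pvChar_eq_of_toNat (a b : Char) (h : a.toNat = b.toNat) : a = b := by
  unfold Char.toNat at h
  exact Char.ext (UInt32.toNat_inj.mp h)

-- A's loop body equals B's per-vowel indicator sum, for one domain character
theorem pvStepA_char (c : Char) (hc : pvDomChar c = true) :
    pvStepA 0 c =
      66 * ((if c == 'a' then (1:Int) else 0) + (if c == 'A' then 1 else 0)) +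
      72 * ((if c == 'e' then (1:Int) else 0) + (if c == 'E' then 1 else 0)) +
      89 * ((if c == 'i' then (1:Int) else 0) + (if c == 'I' then 1 else 0)) +
      73 * ((if c == 'o' then (1:Int) else 0) + (if c == 'O' then 1 else 0)) +
      19 * ((if c == 'u' then (1:Int) else 0) + (if c == 'U' then 1 else 0)) := by
  by_cases h1 : c = 'a'; · subst h1; decide
  by_cases h2 : c = 'e'; · subst h2; decide
  by_cases h3 : c = 'i'; · subst h3; decide
  by_cases h4 : c = 'o'; · subst h4; decide
  by_cases h5 : c = 'u'; · subst h5; decide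
  by_cases h6 : c = 'A'; · subst h6; decide
  by_cases h7 : c = 'E'; · subst h7; decide
  by_cases h8 : c = 'I'; · subst h8; decide
  by_cases h9 : c = 'O'; · subst h9; decide
  by_cases h10 : c = 'U'; · subst h10; decide
  -- c is none of the ten vowels
  have hval : (Char.ofNat (c.toNat + 32)).toNat = c.toNat + 32 := by
    have hle : c.toNat ≤ 126 := by
      simp only [pvDomChar, Bool.or_eq_true, Bool.and_eq_true, decide_eq_true_eq,
        Nat.beq_eq_true_eq, beq_iff_eq] at hc
      omega
    rw [Char.toNat_ofNat]
    have hv : (c.toNat + 32).isValidChar := Or.inl (by omega)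
    simp [hv]
  have hlit : pvVowels = PySem.Dict.mk [('a', 66), ('e', 72), ('i', 89), ('o', 73), ('u', 19)] := by
    decide
  have hna : pvVowels.contains c = false := by
    rw [hlit]; simp [PySem.Dict.contains_mk]
    exact ⟨Ne.symm h1, Ne.symm h2, Ne.symm h3, Ne.symm h4, Ne.symm h5⟩
  have hup : ∀ v V : Char, c ≠ V → V.toNat + 32 = v.toNat → Char.ofNat (c.toNat + 32) ≠ v := by
    intro v V hcV hVv h
    apply hcV
    apply pvChar_eq_of_toNat
    have h' := congrArg Char.toNat h
    rw [hval] at h'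
    omega
  have hnb : pvVowels.contains (Char.ofNat (c.toNat + 32)) = false := by
    rw [hlit]; simp [PySem.Dict.contains_mk]
    exact ⟨Ne.symm (hup 'a' 'A' h6 rfl), Ne.symm (hup 'e' 'E' h7 rfl),
           Ne.symm (hup 'i' 'I' h8 rfl), Ne.symm (hup 'o' 'O' h9 rfl),
           Ne.symm (hup 'u' 'U' h10 rfl)⟩
  unfold pvStepA
  simp [hna, hnb, h1, h2, h3, h4, h5, h6, h7, h8, h9, h10]

theorem pvA_sum (cs : List Char) (h : cs.all pvDomChar = true) :
    cs.foldl pvStepA 0 =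
      66 * ((cs.count 'a' : Int) + (cs.count 'A' : Int)) +
      72 * ((cs.count 'e' : Int) + (cs.count 'E' : Int)) +
      89 * ((cs.count 'i' : Int) + (cs.count 'I' : Int)) +
      73 * ((cs.count 'o' : Int) + (cs.count 'O' : Int)) +
      19 * ((cs.count 'u' : Int) + (cs.count 'U' : Int)) := by
  induction cs with
  | nil => simp
  | cons c cs ih =>
    simp only [List.all_cons, Bool.and_eq_true] at h
    simp only [List.foldl_cons]
    rw [pvStepA_acc, ih h.2, pvStepA_char c h.1]
    simp only [List.count_cons]
    push_cast
    ring

-- ===== VERDICT (by name: the statement is the Claim_ definition above) =====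
theorem str2num_spec : Claim_equal_str2num := by
  intro word hdom
  unfold Spec_str2num str2num str2num_alt
  rw [show (fun result ele =>
      if pvVowels.contains ele then result + pvVowels.getD ele 0
      else if pvVowels.contains (Char.ofNat (ele.toNat + 32)) then
        result + pvVowels.getD (Char.ofNat (ele.toNat + 32)) 0
      else result) = pvStepA from rfl]
  rw [pvA_sum word.toList hdom]
  rw [show pvVowels = PySem.Dict.mk [('a', 66), ('e', 72), ('i', 89), ('o', 73), ('u', 19)] from by decide]
  simp only [List.map_cons, List.map_nil, List.sum_cons, List.sum_nil,
    PySem.Dict.getD_foldl_insert_add_one, PySem.Dict.getD_empty,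
    show pvUpChar 'a' = 'A' from rfl, show pvUpChar 'e' = 'E' from rfl,
    show pvUpChar 'i' = 'I' from rfl, show pvUpChar 'o' = 'O' from rfl,
    show pvUpChar 'u' = 'U' from rfl]
  ring
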